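-- pv_equiv track=rewrite | github.com/fishleongxhh/LeetCode | TwoPointers/532_K-diffPairsInAnArray.py | findPairs2
-- ===== SOURCE A (Python) =====
-- from collections import Counter
--
-- def findPairs2(nums, k):
--     cnt = 0
--     if k == 0:
--         my_dic = Counter(nums)
--         for value in my_dic.values():
--             cnt = cnt+1 if value > 1 else cnt
--     elif k > 0:
--         my_set = set(nums)
--         for item in my_set:
--             if item+k in my_set:
--                 cnt += 1
--     else:
--         cnt = 0
--     return cnt
-- ===== SOURCE B (Python) =====
-- def findPairs2(nums, k):
--     # sort-based instead of hash-based: run-length encode the sorted list;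
--     # k==0 counts runs longer than 1, k>0 merge-counts (two pointers) the
--     # matches between the strictly increasing run values shifted by k and
--     # the run values themselves
--     if k < 0:
--         return 0
--     s = sorted(nums)
--     runs = []
--     i = 0
--     while i < len(s):                      # group equal neighbours into runs
--         j = i + 1
--         while j < len(s) and s[j] == s[i]:
--             j += 1
--         runs.append((s[i], j - i))
--         i = j
--     if k == 0:
--         return sum(1 for _, c in runs if c > 1)
--     vals = [v for v, _ in runs]            # strictly increasing
--     shifted = [v + k for v in vals]        # also strictly increasing
--     cnt = 0
--     i = j = 0                              # merge shifted against vals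
--     while i < len(shifted) and j < len(vals):
--         a, b = shifted[i], vals[j]
--         if a == b:
--             cnt += 1
--             i += 1
--             j += 1
--         elif a < b:
--             i += 1
--         else:
--             j += 1
--     return cnt
-- ===== Notes on version B (the rewrite author's own statement) =====
-- stated objective: alternative
-- what changed: Replaces A's hash-based Counter/set counting with a sort-based algorithm: run-length encode sorted(nums), count runs of length > 1 for k==0, and for k>0 merge-count (two-pointer over two strictly increasing lists) the matches between the run values shifted by k and the run values.
import Mathlib
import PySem

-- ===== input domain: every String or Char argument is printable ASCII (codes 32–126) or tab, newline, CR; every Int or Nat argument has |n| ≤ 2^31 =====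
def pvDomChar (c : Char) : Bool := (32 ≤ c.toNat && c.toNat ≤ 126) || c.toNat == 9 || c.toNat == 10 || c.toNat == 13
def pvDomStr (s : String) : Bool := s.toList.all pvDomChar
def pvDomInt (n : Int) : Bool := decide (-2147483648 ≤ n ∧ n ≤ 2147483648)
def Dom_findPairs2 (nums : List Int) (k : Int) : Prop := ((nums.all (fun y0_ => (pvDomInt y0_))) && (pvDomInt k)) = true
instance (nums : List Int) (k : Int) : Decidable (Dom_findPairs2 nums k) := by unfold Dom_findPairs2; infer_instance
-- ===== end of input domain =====

-- B replaces A's hash-based Counter/set counting with a sort-based algorithm: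
-- run-length encode the sorted list, count runs longer than 1 for k==0, and for
-- k>0 merge-count matches between the run values shifted by k and the run values.

-- ===== PORT A =====
def findPairs2 (nums : List Int) (k : Int) : Int :=
  if k == 0 then
    -- my_dic = Counter(nums); for value in my_dic.values(): cnt = cnt+1 if value > 1 else cnt
    (PySem.Dict.counter nums).values.foldl
      (fun cnt value => if value > 1 then cnt + 1 else cnt) 0
  else if k > 0 then
    -- my_set = set(nums); for item in my_set: if item+k in my_set: cnt += 1
    -- (set iteration: the counted total is independent of hash order)
    let mySet : PySem.Set Int := PySem.Set.ofList nums
    mySet.foldl (fun cnt item => if PySem.Set.contains mySet (item + k) then cnt + 1 else cnt) 0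
  else 0

-- ===== PORT B =====
-- _runs's inner while loop: number of leading copies of v, and the remainder
def runCount (v : Int) : List Int → Nat × List Int
  | [] => (0, [])
  | x :: xs => if x = v then ((runCount v xs).1 + 1, (runCount v xs).2) else (0, x :: xs)

theorem runCount_snd_length (v : Int) : ∀ xs : List Int, (runCount v xs).2.length ≤ xs.length := by
  intro xs
  induction xs with
  | nil => simp [runCount]
  | cons x xs ih =>
    by_cases h : x = v
    · simp only [runCount, if_pos h]; exact Nat.le_succ_of_le ih
    · simp [runCount, h]

-- _runs(s): run-length encoding of the sorted list
def runsRLE : List Int → List (Int × Int)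
  | [] => []
  | v :: rest => (v, ((runCount v rest).1 : Int) + 1) :: runsRLE (runCount v rest).2
termination_by l => l.length
decreasing_by simpa using Nat.lt_succ_of_le (runCount_snd_length v rest)

-- _common(xs, ys): merge-count of shared elements of two strictly increasing lists
def common : List Int → List Int → Int
  | [], _ => 0
  | _ :: _, [] => 0
  | x :: xs, y :: ys =>
    if x = y then 1 + common xs ys
    else if x < y then common xs (y :: ys)
    else common (x :: xs) ys
termination_by xs ys => xs.length + ys.length

def findPairs2_alt (nums : List Int) (k : Int) : Int :=
  if k < 0 then 0
  else
    let runs := runsRLE (PySem.List.sorted nums (fun x => x) false)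
    if k = 0 then ((runs.countP (fun p => decide (p.2 > 1)) : Nat) : Int)
    else
      let vals := runs.map Prod.fst
      common (vals.map (· + k)) vals

-- ===== PRECONDITION & SPEC =====
def Spec_findPairs2 (nums : List Int) (k : Int) (out : Int) : Prop := out = findPairs2_alt nums k
instance (nums : List Int) (k : Int) (out : Int) : Decidable (Spec_findPairs2 nums k out) := by unfold Spec_findPairs2; infer_instance

-- ===== CLAIM (what is proved, stated in full; the proofs are below) =====
def Claim_equal_findPairs2 : Prop := ∀ (nums : List Int) (k : Int), Dom_findPairs2 nums k → Spec_findPairs2 nums k (findPairs2 nums k)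

-- ===== LEMMAS AND PROOFS =====

theorem runCount_eq (v : Int) : ∀ xs : List Int,
    xs = List.replicate (runCount v xs).1 v ++ (runCount v xs).2 := by
  intro xs
  induction xs with
  | nil => simp [runCount]
  | cons x xs ih =>
    by_cases h : x = v
    · simp only [runCount, if_pos h, List.replicate_succ, List.cons_append]
      rw [← ih, h]
    · simp [runCount, h]

theorem runCount_snd_head (v : Int) : ∀ xs : List Int,
    (runCount v xs).2 = [] ∨ ∃ h t, (runCount v xs).2 = h :: t ∧ h ≠ v := by
  intro xs
  induction xs with
  | nil => simp [runCount]
  | cons x xs ih =>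
    by_cases h : x = v
    · simpa only [runCount, if_pos h] using ih
    · exact Or.inr ⟨x, xs, by simp [runCount, h], h⟩

-- everything we need about the run-length encoding of a sorted list
theorem runsFacts : ∀ s : List Int, s.Pairwise (· ≤ ·) →
    ((runsRLE s).map Prod.fst).Pairwise (· < ·) ∧
    (∀ x, x ∈ (runsRLE s).map Prod.fst ↔ x ∈ s) ∧
    (∀ p ∈ runsRLE s, p.2 = (s.count p.1 : Int)) := by
  intro s
  induction s using runsRLE.induct with
  | case1 => intro _; simp [runsRLE]
  | case2 v rest ih =>
    intro hs
    set n := (runCount v rest).1 with hn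
    set r := (runCount v rest).2 with hr
    have hsplit : rest = List.replicate n v ++ r := runCount_eq v rest
    have hcons := List.pairwise_cons.mp hs
    have hrsub : r.Sublist rest := hsplit ▸ List.sublist_append_right _ _
    have hrp : r.Pairwise (· ≤ ·) := hcons.2.sublist hrsub
    have hvle : ∀ y ∈ r, v ≤ y := fun y hy => hcons.1 y (hrsub.mem hy)
    have hvlt : ∀ y ∈ r, v < y := by
      rcases runCount_snd_head v rest with h0 | ⟨h, t, hht, hne⟩
      · intro y hy; rw [hr, h0] at hy; simp at hy
      · have hht' : r = h :: t := by rw [hr, hht]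
        intro y hy
        rw [hht'] at hy
        have hvh : v < h := lt_of_le_of_ne (hvle h (by rw [hht']; simp)) (Ne.symm hne)
        rcases List.mem_cons.mp hy with rfl | hy'
        · exact hvh
        · have : h ≤ y := (List.pairwise_cons.mp (hht' ▸ hrp)).1 y hy'
          omega
    have hvnr : v ∉ r := fun h => absurd (hvlt v h) (lt_irrefl v)
    obtain ⟨ihpw, ihmem, ihcnt⟩ := ih hrp
    have hrl : runsRLE (v :: rest) = (v, (n : Int) + 1) :: runsRLE r := by
      rw [runsRLE]
    refine ⟨?_, ?_, ?_⟩
    · rw [hrl]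
      simp only [List.map_cons, List.pairwise_cons]
      exact ⟨fun x hx => hvlt x ((ihmem x).mp hx), ihpw⟩
    · intro x
      rw [hrl]
      simp only [List.map_cons, List.mem_cons, ihmem x, hsplit, List.mem_append,
        List.mem_replicate]
      constructor
      · rintro (rfl | hx)
        · exact Or.inl rfl
        · exact Or.inr (Or.inr hx)
      · rintro (rfl | ⟨_, rfl⟩ | hx)
        · exact Or.inl rfl
        · exact Or.inl rfl
        · exact Or.inr hx
    · intro p hp
      rw [hrl] at hp
      rcases List.mem_cons.mp hp with rfl | hp
      · have hc0 : r.count v = 0 := List.count_eq_zero.mpr hvnr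
        simp only [hsplit, List.count_cons_self, List.count_append,
          List.count_replicate_self, hc0]
        push_cast
        ring
      · have hpm : p.1 ∈ r := (ihmem p.1).mp (List.mem_map_of_mem hp)
        have hpne : p.1 ≠ v := fun h => absurd (hvlt p.1 hpm) (h ▸ lt_irrefl v)
        rw [ihcnt p hp]
        congr 1
        rw [hsplit]
        simp [List.count_append, List.count_replicate, Ne.symm hpne]

theorem common_spec : ∀ xs ys : List Int, xs.Pairwise (· < ·) → ys.Pairwise (· < ·) →
    common xs ys = ((xs.countP (fun x => decide (x ∈ ys)) : Nat) : Int) := by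
  intro xs ys
  induction xs, ys using common.induct with
  | case1 ys => intro _ _; simp [common]
  | case2 x xs => intro _ _; simp [common]
  | case3 xs y ys ihx =>
    intro hx hy
    have hx' := List.pairwise_cons.mp hx
    have hy' := List.pairwise_cons.mp hy
    simp only [common]
    rw [ihx hx'.2 hy'.2, List.countP_cons]
    have hcg : xs.countP (fun z => decide (z ∈ ys)) = xs.countP (fun z => decide (z ∈ y :: ys)) := by
      apply List.countP_congr
      intro z hz
      have hzy : y < z := hx'.1 z hz
      simp only [decide_eq_true_eq, List.mem_cons]
      constructor
      · exact fun h => Or.inr h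
      · rintro (rfl | h)
        · exact absurd hzy (lt_irrefl z)
        · exact h
    rw [hcg]
    simp only [List.mem_cons, true_or, decide_true, if_pos]
    push_cast
    ring
  | case4 x xs y ys hne hlt ihx =>
    intro hx hy
    have hx' := List.pairwise_cons.mp hx
    simp only [common, if_neg hne, if_pos hlt]
    rw [ihx hx'.2 hy, List.countP_cons]
    have hxny : x ∉ y :: ys := by
      intro hmem
      rcases List.mem_cons.mp hmem with rfl | h
      · exact absurd hlt (lt_irrefl x)
      · have := (List.pairwise_cons.mp hy).1 x h
        omega
    simp [hxny]
  | case5 x xs y ys hne hnlt ihy =>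
    intro hx hy
    have hy' := List.pairwise_cons.mp hy
    have hylt : y < x := by
      rcases lt_trichotomy x y with h | h | h
      · exact absurd h hnlt
      · exact absurd h hne
      · exact h
    simp only [common, if_neg hne, if_neg hnlt]
    rw [ihy hx hy'.2]
    congr 1
    apply List.countP_congr
    intro z hz
    have hxz : x ≤ z := by
      rcases List.mem_cons.mp hz with h | h
      · exact h ▸ le_refl z
      · exact le_of_lt ((List.pairwise_cons.mp hx).1 z h)
    simp only [decide_eq_true_eq, List.mem_cons]
    constructor
    · exact fun h => Or.inr h
    · rintro (hzy | h)
      · omega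
      · exact h

theorem countP_eq_nodup (p : Int → Bool) (l1 l2 : List Int) (h1 : l1.Nodup) (h2 : l2.Nodup)
    (hm : ∀ x, x ∈ l1 ↔ x ∈ l2) : l1.countP p = l2.countP p :=
  ((List.perm_ext_iff_of_nodup h1 h2).mpr hm).countP_eq p

-- ===== VERDICT =====
theorem findPairs2_spec : Claim_equal_findPairs2 := by
  unfold Claim_equal_findPairs2
  intro nums k _
  unfold Spec_findPairs2 findPairs2 findPairs2_alt
  set s := PySem.List.sorted nums (fun x => x) false with hsdef
  have hperm : s.Perm nums := PySem.List.sorted_perm nums (fun x => x) false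
  have hpw : s.Pairwise (· ≤ ·) := by
    simpa using PySem.List.sorted_pairwise (xs := nums) (key := fun x => x)
  obtain ⟨hvpw, hvmem, hvcnt⟩ := runsFacts s hpw
  have hvnd : ((runsRLE s).map Prod.fst).Nodup := hvpw.nodup
  have hmemnums : ∀ x, x ∈ (runsRLE s).map Prod.fst ↔ x ∈ nums := by
    intro x; rw [hvmem x]; exact hperm.mem_iff
  by_cases hk0 : k = 0
  · subst hk0
    simp only [beq_self_eq_true, if_true, lt_irrefl, if_false]
    -- A side: foldl over counter values = countP over the distinct values
    have hv : (PySem.Dict.counter nums).values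
        = (PySem.Set.ofList nums).map (fun v => (nums.count v : Int)) := by
      have h := PySem.Dict.items_counter (xs := nums)
      show ((PySem.Dict.counter nums).items).map Prod.snd = _
      rw [h, List.map_map]
      rfl
    rw [hv, List.foldl_map, PySem.List.foldl_ite_add_one]
    -- B side: countP over runs = countP over the distinct values
    have hb : (runsRLE s).countP (fun p => decide (p.2 > 1))
        = ((runsRLE s).map Prod.fst).countP (fun v => decide ((nums.count v : Int) > 1)) := by
      rw [List.countP_map]
      apply List.countP_congr
      intro p hp
      have : p.2 = (s.count p.1 : Int) := hvcnt p hp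
      simp only [Function.comp, this, hperm.count_eq]
    rw [hb, countP_eq_nodup _ _ (PySem.Set.ofList nums) hvnd (PySem.Set.nodup_ofList nums)
      (fun x => (hmemnums x).trans (PySem.Set.mem_ofList nums x).symm)]
    simp
  · by_cases hkpos : k > 0
    · have hne : (k == 0) = false := by simp [hk0]
      have hnlt : ¬ k < 0 := by omega
      simp only [hne, Bool.false_eq_true, if_false, if_pos hkpos, if_neg hnlt, if_neg hk0]
      rw [PySem.List.foldl_if_add_one]
      -- B side: merge-count = countP of shifted membership
      have hmap : ((runsRLE s).map Prod.fst).map (· + k) |>.Pairwise (· < ·) := by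
        refine List.Pairwise.map _ ?_ hvpw
        intro a b h; omega
      rw [common_spec _ _ hmap hvpw, List.countP_map]
      have hb : ((runsRLE s).map Prod.fst).countP
            ((fun x => decide (x ∈ (runsRLE s).map Prod.fst)) ∘ (· + k))
          = ((runsRLE s).map Prod.fst).countP
            (fun item => PySem.Set.contains (PySem.Set.ofList nums) (item + k)) := by
        apply List.countP_congr
        intro v _
        simp [Function.comp, PySem.Set.contains, hmemnums (v + k), PySem.Set.mem_ofList]
      rw [hb, countP_eq_nodup _ _ (PySem.Set.ofList nums) hvnd (PySem.Set.nodup_ofList nums)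
        (fun x => (hmemnums x).trans (PySem.Set.mem_ofList nums x).symm)]
      simp
    · have hne : (k == 0) = false := by simp [hk0]
      have hlt : k < 0 := by omega
      simp [hne, hkpos, hlt]
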